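-- pv_equiv track=rewrite | github.com/uw-it-aca/myuw | myuw/dao/coda.py | _process_section_label
-- ===== SOURCE A (Python) =====
-- def _process_section_label(section_label):
--     section_label = section_label.replace("_", "-")
--     indices = section_label.count("-")
--
--     if indices > 4:
--         counts = 0
--         for i in range(0, len(section_label)):
--             if section_label[i] == '-':
--                 counts += 1
--
--             if counts == 3:
--                 section_label = section_label[:i] + " " + section_label[i+1:]
--                 break
--
--     return section_label.replace(" ", "%20")
-- ===== SOURCE B (Python) =====
-- def _process_section_label(section_label):
--     section_label = section_label.replace("_", "-")
--     parts = section_label.split("-")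
--     if len(parts) - 1 > 4:
--         section_label = "-".join(parts[:3]) + " " + "-".join(parts[3:])
--     return section_label.replace(" ", "%20")
-- ===== Notes on version B (the rewrite author's own statement) =====
-- stated objective: simpler
-- what changed: Replaced the index-by-index dash-counting loop with character slicing by a split on '-' and a rejoin of the first three pieces and the rest around a space.
import Mathlib
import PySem

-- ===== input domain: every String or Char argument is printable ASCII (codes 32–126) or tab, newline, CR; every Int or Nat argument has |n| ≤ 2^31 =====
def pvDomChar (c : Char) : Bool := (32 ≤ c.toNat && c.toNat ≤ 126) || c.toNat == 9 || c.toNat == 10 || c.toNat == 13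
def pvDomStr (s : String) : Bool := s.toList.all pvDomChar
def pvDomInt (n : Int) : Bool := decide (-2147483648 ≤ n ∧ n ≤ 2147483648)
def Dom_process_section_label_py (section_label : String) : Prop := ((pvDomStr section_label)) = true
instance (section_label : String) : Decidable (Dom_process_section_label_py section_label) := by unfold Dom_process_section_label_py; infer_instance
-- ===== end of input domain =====

-- B replaces A's index-counting loop (find the 3rd dash by scanning indices, then splice with
-- slices) by a split on '-' and a rejoin of the first three pieces and the rest around a space;
-- same return value, objective: simpler.

-- ===== PORT A =====
-- A's for-loop with break: index i over the string, running dash count; on the count reaching 3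
-- replace that character by a space via the two slices and stop.  Strings are ported on
-- List Char via PySem.Chars (exact on the domain), wrapped back with String.ofList.
def pvALoop (s : List Char) (i counts : Nat) : List Char :=
  if i < s.length then
    let counts' := if PySem.List.pyGetD s (i : Int) ' ' = '-' then counts + 1 else counts
    if counts' = 3 then
      PySem.List.slice s none (some (i : Int)) ++ ' ' :: PySem.List.slice s (some ((i : Int) + 1)) none
    else pvALoop s (i + 1) counts'
  else s
termination_by s.length - i

def process_section_label_py (section_label : String) : String :=
  let s := PySem.Chars.replace section_label.toList ['_'] ['-']
  let indices := PySem.Chars.count s ['-']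
  let s2 := if indices > 4 then pvALoop s 0 0 else s
  String.ofList (PySem.Chars.replace s2 [' '] ['%', '2', '0'])

-- ===== PORT B =====
def process_section_label_py_alt (section_label : String) : String :=
  let s := PySem.Chars.replace section_label.toList ['_'] ['-']
  let parts := PySem.Chars.splitOn s ['-']
  let s2 :=
    if (parts.length : Int) - 1 > 4 then
      PySem.Chars.join ['-'] (parts.take 3) ++ ' ' :: PySem.Chars.join ['-'] (parts.drop 3)
    else s
  String.ofList (PySem.Chars.replace s2 [' '] ['%', '2', '0'])

-- ===== PRECONDITION & SPEC =====
def Spec_process_section_label_py (section_label : String) (out : String) : Prop := out = process_section_label_py_alt section_label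
instance (section_label : String) (out : String) : Decidable (Spec_process_section_label_py section_label out) := by unfold Spec_process_section_label_py; infer_instance

-- ===== CLAIM (what is proved, stated in full; the proofs are below) =====
def Claim_equal_process_section_label_py : Prop := ∀ (section_label : String), Dom_process_section_label_py section_label → Spec_process_section_label_py section_label (process_section_label_py section_label)

-- ===== LEMMAS AND PROOFS =====

theorem pv_splitOn_go_spec : ∀ (fuel : Nat) (l cur : List Char) (acc : List (List Char)), l.length < fuel →
    PySem.Chars.splitOn.go ['-'] fuel l cur acc
      = acc.reverse ++ (List.splitOn '-' l).modifyHead (cur.reverse ++ ·) := by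
  intro fuel
  induction fuel with
  | zero => intro l cur acc h; omega
  | succ fuel ih =>
    intro l cur acc h
    cases l with
    | nil => simp [PySem.Chars.splitOn.go, List.splitOn]
    | cons c rest =>
      by_cases hc : c = '-'
      · subst hc
        rw [show PySem.Chars.splitOn.go ['-'] (fuel+1) ('-'::rest) cur acc
              = PySem.Chars.splitOn.go ['-'] fuel rest [] (cur.reverse :: acc) from by
            simp [PySem.Chars.splitOn.go, List.isPrefixOf]]
        rw [ih rest [] (cur.reverse :: acc) (by simpa using h)]
        simp only [List.splitOn, List.splitOnP_cons, beq_self_eq_true, if_true]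
        cases List.splitOnP (fun x => x == '-') rest <;> simp
      · rw [show PySem.Chars.splitOn.go ['-'] (fuel+1) (c::rest) cur acc
              = PySem.Chars.splitOn.go ['-'] fuel rest (c :: cur) acc from by
            simp [PySem.Chars.splitOn.go, List.isPrefixOf, (Ne.symm hc : '-' ≠ c)]]
        rw [ih rest (c :: cur) acc (by simpa using h)]
        simp only [List.splitOn, List.splitOnP_cons]
        have hcb : (c == '-') = false := by simp [hc]
        rw [hcb]
        cases hP : List.splitOnP (fun a => a == '-') rest with
        | nil => exact absurd hP (List.splitOnP_ne_nil _ _)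
        | cons p ps => simp

theorem pv_splitOn_spec (l : List Char) : PySem.Chars.splitOn l ['-'] = List.splitOn '-' l := by
  rw [PySem.Chars.splitOn, pv_splitOn_go_spec _ _ _ _ (by omega)]
  cases List.splitOn '-' l <;> simp

theorem pv_count_go_spec : ∀ (fuel : Nat) (l : List Char) (acc : Nat), l.length ≤ fuel →
    PySem.Chars.count.go ['-'] fuel l acc = acc + l.count '-' := by
  intro fuel
  induction fuel with
  | zero =>
    intro l acc h
    have : l = [] := by cases l <;> simp_all
    subst this
    simp [PySem.Chars.count.go]
  | succ fuel ih =>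
    intro l acc h
    cases l with
    | nil => simp [PySem.Chars.count.go]
    | cons c rest =>
      by_cases hc : c = '-'
      · subst hc
        rw [show PySem.Chars.count.go ['-'] (fuel+1) ('-'::rest) acc
              = PySem.Chars.count.go ['-'] fuel rest (acc + 1) from by
            simp [PySem.Chars.count.go, List.isPrefixOf]]
        rw [ih rest (acc+1) (by simpa using h)]
        simp
        omega
      · rw [show PySem.Chars.count.go ['-'] (fuel+1) (c::rest) acc
              = PySem.Chars.count.go ['-'] fuel rest acc from by
            simp [PySem.Chars.count.go, List.isPrefixOf, (Ne.symm hc : '-' ≠ c)]]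
        rw [ih rest acc (by simpa using h)]
        simp [hc]

theorem pv_count_spec (l : List Char) : PySem.Chars.count l ['-'] = l.count '-' := by
  rw [PySem.Chars.count]
  simp [pv_count_go_spec l.length l 0 (le_refl _)]

theorem pv_length_splitOn (l : List Char) : (List.splitOn '-' l).length = l.count '-' + 1 := by
  induction l with
  | nil => simp [List.splitOn]
  | cons c rest ih =>
    by_cases hc : c = '-'
    · subst hc
      simp [List.splitOn, List.splitOnP_cons] at *
      omega
    · simp [List.splitOn, List.splitOnP_cons, hc] at *
      omega

theorem pv_splitOn_dash_free (l : List Char) :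
    ∀ p ∈ List.splitOnP (fun b => b == '-') l, '-' ∉ p := by
  induction l with
  | nil => simp [List.splitOnP_nil]
  | cons c rest ih =>
    intro p hp
    by_cases hc : c = '-'
    · subst hc
      rw [List.splitOnP_cons] at hp
      simp only [beq_self_eq_true, if_true, List.mem_cons] at hp
      rcases hp with rfl | hp
      · simp
      · exact ih p hp
    · rw [List.splitOnP_cons, if_neg (by simp [hc])] at hp
      cases hP : List.splitOnP (fun b => b == '-') rest with
      | nil => exact absurd hP (List.splitOnP_ne_nil _ _)
      | cons q qs =>
        rw [hP] at hp
        simp only [List.modifyHead, List.mem_cons] at hp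
        rcases hp with rfl | hp
        · intro hmem
          rcases List.mem_cons.mp hmem with h1 | h1
          · exact hc h1.symm
          · exact ih q (by rw [hP]; exact List.mem_cons_self ..) h1
        · exact ih p (by rw [hP]; exact List.mem_cons_of_mem _ hp)

theorem pv_getD_of_drop (s : List Char) (i : Nat) (x : Char) (xs : List Char)
    (h : List.drop i s = x :: xs) : PySem.List.pyGetD s (i : Int) ' ' = x := by
  rw [PySem.List.pyGetD_natCast]
  have h0 : s[i]? = some x := by
    have hd : (List.drop i s)[0]? = s[i + 0]? := List.getElem?_drop
    rw [h] at hd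
    simpa using hd.symm
  simp [List.getD_eq_getElem?_getD, h0]

theorem pv_lt_of_drop (s : List Char) (i : Nat) (x : Char) (xs : List Char)
    (h : List.drop i s = x :: xs) : i < s.length := by
  by_contra hn
  rw [List.drop_eq_nil_of_le (by omega)] at h
  exact absurd h (by simp)

theorem pv_drop_succ (s : List Char) (i : Nat) (x : Char) (xs : List Char)
    (h : List.drop i s = x :: xs) : List.drop (i + 1) s = xs := by
  have hd : List.drop 1 (List.drop i s) = List.drop (i + 1) s := List.drop_drop
  rw [h] at hd
  simpa using hd.symm

theorem pv_aLoop_skip : ∀ (q r s : List Char) (i c : Nat), c < 3 → (∀ x ∈ q, x ≠ '-') →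
    List.drop i s = q ++ '-' :: r → pvALoop s i c = pvALoop s (i + q.length) c := by
  intro q
  induction q with
  | nil => intro r s i c _ _ _; simp
  | cons x q' ih =>
    intro r s i c hc hq hdrop
    rw [List.cons_append] at hdrop
    have hx : x ≠ '-' := hq x (List.mem_cons_self ..)
    have hget := pv_getD_of_drop s i x _ hdrop
    have hlt := pv_lt_of_drop s i x _ hdrop
    rw [pvALoop]
    rw [if_pos hlt]
    simp only [hget, if_neg hx, if_neg (by omega : ¬ c = 3)]
    have := ih r s (i + 1) c hc (fun y hy => hq y (List.mem_cons_of_mem _ hy))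
      (pv_drop_succ s i x _ hdrop)
    rw [this]
    congr 1
    simp [List.length_cons]
    omega

theorem pv_aLoop_dash_lt (s r : List Char) (i c : Nat) (h : List.drop i s = '-' :: r)
    (hc : c + 1 < 3) : pvALoop s i c = pvALoop s (i + 1) (c + 1) := by
  rw [pvALoop, if_pos (pv_lt_of_drop s i '-' r h)]
  simp [pv_getD_of_drop s i '-' r h, show ¬ (c + 1 = 3) by omega]

theorem pv_aLoop_dash_three (s r : List Char) (i : Nat) (h : List.drop i s = '-' :: r) :
    pvALoop s i 2 = List.take i s ++ ' ' :: r := by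
  rw [pvALoop, if_pos (pv_lt_of_drop s i '-' r h)]
  simp only [pv_getD_of_drop s i '-' r h]
  rw [PySem.List.slice_to_natCast]
  rw [show ((i : Int) + 1) = ((i + 1 : Nat) : Int) by push_cast; ring]
  rw [PySem.List.slice_from_natCast]
  rw [pv_drop_succ s i '-' r h]
  simp

theorem pv_intercalate_cons (x : List Char) (ps : List (List Char)) (h : ps ≠ []) :
    List.intercalate ['-'] (x :: ps) = x ++ '-' :: List.intercalate ['-'] ps := by
  cases ps with
  | nil => exact absurd rfl h
  | cons y t => simp [List.intercalate]

theorem pv_core (t : List Char) :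
    (if PySem.Chars.count t ['-'] > 4 then pvALoop t 0 0 else t)
      = (if ((PySem.Chars.splitOn t ['-']).length : Int) - 1 > 4 then
          PySem.Chars.join ['-'] ((PySem.Chars.splitOn t ['-']).take 3) ++ ' ' ::
            PySem.Chars.join ['-'] ((PySem.Chars.splitOn t ['-']).drop 3)
        else t) := by
  rw [pv_splitOn_spec, pv_count_spec]
  have hlen := pv_length_splitOn t
  by_cases hcnt : t.count '-' > 4
  · rw [if_pos hcnt, if_pos (by rw [hlen]; push_cast; omega)]
    obtain ⟨p1, p2, p3, ps, hE, hps⟩ :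
        ∃ p1 p2 p3 ps, List.splitOn '-' t = p1 :: p2 :: p3 :: ps ∧ ps ≠ [] := by
      rcases hE : List.splitOn '-' t with _ | ⟨p1, _ | ⟨p2, _ | ⟨p3, ps⟩⟩⟩ <;>
        rw [hE] at hlen <;> simp at hlen <;> try omega
      refine ⟨p1, p2, p3, ps, rfl, ?_⟩
      intro hnil
      rw [hnil] at hlen
      simp at hlen
      omega
    have hfree : ∀ p ∈ List.splitOn '-' t, ∀ x ∈ p, x ≠ '-' := by
      intro p hp x hx hxd
      exact pv_splitOn_dash_free t p hp (hxd ▸ hx)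
    rw [hE] at hfree
    set R := List.intercalate ['-'] ps with hR
    have ht : t = p1 ++ '-' :: (p2 ++ '-' :: (p3 ++ '-' :: R)) := by
      conv_lhs => rw [← List.intercalate_splitOn t '-', hE]
      rw [pv_intercalate_cons p1 _ (by simp), pv_intercalate_cons p2 _ (by simp),
        pv_intercalate_cons p3 _ hps]
    -- A side: walk the loop to the third dash
    have hd1 : List.drop p1.length t = '-' :: (p2 ++ '-' :: (p3 ++ '-' :: R)) := by
      rw [ht]; exact List.drop_left
    have hd2 : List.drop (p1.length + 1) t = p2 ++ '-' :: (p3 ++ '-' :: R) :=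
      pv_drop_succ _ _ _ _ hd1
    have hd3 : List.drop (p1.length + 1 + p2.length) t = '-' :: (p3 ++ '-' :: R) := by
      have hdd : List.drop p2.length (List.drop (p1.length + 1) t)
          = List.drop (p1.length + 1 + p2.length) t := List.drop_drop
      rw [hd2, List.drop_left] at hdd
      exact hdd.symm
    have hd4 : List.drop (p1.length + 1 + p2.length + 1) t = p3 ++ '-' :: R :=
      pv_drop_succ _ _ _ _ hd3
    have hd5 : List.drop (p1.length + 1 + p2.length + 1 + p3.length) t = '-' :: R := by
      have hdd : List.drop p3.length (List.drop (p1.length + 1 + p2.length + 1) t)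
          = List.drop (p1.length + 1 + p2.length + 1 + p3.length) t := List.drop_drop
      rw [hd4, List.drop_left] at hdd
      exact hdd.symm
    have hA : pvALoop t 0 0
        = List.take (p1.length + 1 + p2.length + 1 + p3.length) t ++ ' ' :: R := by
      rw [pv_aLoop_skip p1 _ t 0 0 (by omega) (hfree p1 (by simp)) (by simpa using ht)]
      rw [show 0 + p1.length = p1.length by omega]
      rw [pv_aLoop_dash_lt t _ p1.length 0 hd1 (by omega)]
      rw [pv_aLoop_skip p2 _ t (p1.length + 1) 1 (by omega) (hfree p2 (by simp)) hd2]
      rw [pv_aLoop_dash_lt t _ (p1.length + 1 + p2.length) 1 hd3 (by omega)]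
      rw [pv_aLoop_skip p3 _ t (p1.length + 1 + p2.length + 1) 2 (by omega)
        (hfree p3 (by simp)) hd4]
      exact pv_aLoop_dash_three t R _ hd5
    have htake : List.take (p1.length + 1 + p2.length + 1 + p3.length) t
        = p1 ++ '-' :: (p2 ++ '-' :: p3) := by
      have ht' : t = (p1 ++ '-' :: (p2 ++ '-' :: p3)) ++ '-' :: R := by
        rw [ht]; simp
      rw [ht', show p1.length + 1 + p2.length + 1 + p3.length
        = (p1 ++ '-' :: (p2 ++ '-' :: p3)).length by simp; omega]
      exact List.take_left
    rw [hA, htake, hE]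
    simp only [PySem.Chars.join, List.take, List.drop]
    rw [pv_intercalate_cons p1 _ (by simp), pv_intercalate_cons p2 _ (by simp)]
    simp [List.intercalate]
    simp [hR, List.intercalate]
  · rw [if_neg hcnt, if_neg (by rw [hlen]; push_cast; omega)]

-- ===== VERDICT (by name: the statement is the Claim_ definition above) =====
theorem process_section_label_py_spec : Claim_equal_process_section_label_py := by
  intro s _
  unfold Spec_process_section_label_py
  exact congrArg (fun l => String.ofList (PySem.Chars.replace l [' '] ['%', '2', '0']))
    (pv_core (PySem.Chars.replace s.toList ['_'] ['-']))
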